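-- pv_equiv track=rewrite | github.com/mbhasin12/most_active_cookie | most_active_cookie.py | findMostActiveCookie
-- ===== SOURCE A (Python) =====
-- def findMostActiveCookie(cookie_dict, date):
--
--     if date in cookie_dict.keys():
--         cookie_dict_on_date = cookie_dict[date]
--         max_key = max(cookie_dict_on_date, key=cookie_dict_on_date.get) #find the cookie with the most occurances on specific day
--         max_val = cookie_dict_on_date[max_key] #find value associated with that cookie in order to check if multiple keys have that value
--         most_active_cookies = []
--
--         for key in cookie_dict_on_date.keys():
--             if (cookie_dict_on_date[key] == max_val):
--                 most_active_cookies.append(key) #add all cookies which have max value to a list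
--
--         return most_active_cookies
--     else:
--         return []
-- ===== SOURCE B (Python) =====
-- def findMostActiveCookie(cookie_dict, date):
--     if date not in cookie_dict:
--         return []
--     groups = {}
--     for cookie, count in cookie_dict[date].items():
--         groups.setdefault(count, []).append(cookie)
--     return groups[max(groups)]
-- ===== Notes on version B (the rewrite author's own statement) =====
-- stated objective: alternative
-- what changed: B buckets cookies by their count into a dict in one pass and returns the max-count bucket, instead of A's max-by-value key search followed by a second filtering pass over the dict.
import Mathlib
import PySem

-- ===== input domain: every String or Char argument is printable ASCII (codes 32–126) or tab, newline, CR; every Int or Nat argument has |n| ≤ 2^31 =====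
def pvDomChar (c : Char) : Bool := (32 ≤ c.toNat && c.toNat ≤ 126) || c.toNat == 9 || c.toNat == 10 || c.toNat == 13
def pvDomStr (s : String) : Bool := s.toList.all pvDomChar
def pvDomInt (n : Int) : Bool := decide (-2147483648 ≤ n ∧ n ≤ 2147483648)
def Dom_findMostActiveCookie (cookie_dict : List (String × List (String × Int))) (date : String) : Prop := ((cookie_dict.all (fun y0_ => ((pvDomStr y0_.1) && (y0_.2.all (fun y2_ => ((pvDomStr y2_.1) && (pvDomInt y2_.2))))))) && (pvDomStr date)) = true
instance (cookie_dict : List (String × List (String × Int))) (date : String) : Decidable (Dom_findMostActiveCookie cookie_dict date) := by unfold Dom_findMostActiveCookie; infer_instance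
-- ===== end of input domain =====

-- ===== PORT A =====
-- Port of A: find the key with the max count (max with key=get), then a second pass
-- collecting every key with that count. Where Python raises ValueError (empty inner
-- dict), the match's none branch returns []; those inputs are excluded by Pre_.
def findMostActiveCookie (cookie_dict : List (String × List (String × Int))) (date : String) : List String :=
  let d := PySem.Dict.ofList cookie_dict
  if d.contains date then
    let inner := PySem.Dict.ofList (d.getD date [])
    match PySem.List.max? inner.keys (fun k => inner.getD k 0) with
    | none => []  -- Python: ValueError from max() on an empty dict; outside Pre_
    | some max_key =>
      let max_val := inner.getD max_key 0
      inner.keys.foldl (fun acc k => if inner.getD k 0 == max_val then acc ++ [k] else acc) []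
  else []

-- ===== PORT B =====
-- Port of B: one pass bucketing cookies by count (groups.setdefault(count, []).append(cookie)),
-- then return the bucket of max(groups).
def findMostActiveCookie_alt (cookie_dict : List (String × List (String × Int))) (date : String) : List String :=
  let d := PySem.Dict.ofList cookie_dict
  if d.contains date then
    let inner := PySem.Dict.ofList (d.getD date [])
    let groups : PySem.Dict Int (List String) :=
      inner.items.foldl (fun g p => g.modify p.2 [] (fun l => l ++ [p.1])) PySem.Dict.empty
    match PySem.List.max? groups.keys (fun v => v) with
    | none => []  -- Python: ValueError from max() on empty groups; outside Pre_
    | some m => groups.getD m []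
  else []

-- ===== PRECONDITION & SPEC =====
-- Pre_ excludes exactly the inputs where the date maps to an EMPTY inner dict: there
-- Python A (and Python B) raise ValueError from max() on an empty sequence.
def Pre_findMostActiveCookie (cookie_dict : List (String × List (String × Int))) (date : String) : Prop :=
  ¬ ((PySem.Dict.ofList cookie_dict).get? date = some [])
instance (cookie_dict : List (String × List (String × Int))) (date : String) : Decidable (Pre_findMostActiveCookie cookie_dict date) := by unfold Pre_findMostActiveCookie; infer_instance

def pvWitness_findMostActiveCookie : (List (String × List (String × Int))) × String :=
  ([("2018-12-09", [("AtY0laUfhglK3lC7", 2), ("SAZuXPGUrfbcn5UA", 1)])], "2018-12-09")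

def Spec_findMostActiveCookie (cookie_dict : List (String × List (String × Int))) (date : String) (out : List String) : Prop := out = findMostActiveCookie_alt cookie_dict date
instance (cookie_dict : List (String × List (String × Int))) (date : String) (out : List String) : Decidable (Spec_findMostActiveCookie cookie_dict date out) := by unfold Spec_findMostActiveCookie; infer_instance

-- ===== CLAIM (what is proved, stated in full; the proofs are below) =====
def Claim_equal_findMostActiveCookie : Prop := ∀ (cookie_dict : List (String × List (String × Int))) (date : String), Dom_findMostActiveCookie cookie_dict date → Pre_findMostActiveCookie cookie_dict date → Spec_findMostActiveCookie cookie_dict date (findMostActiveCookie cookie_dict date)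

-- ===== LEMMAS AND PROOFS =====

-- the grouping dict built by B's loop over d.items
def pvGroups (d : PySem.Dict String Int) : PySem.Dict Int (List String) :=
  d.items.foldl (fun g p => g.modify p.2 [] (fun l => l ++ [p.1])) PySem.Dict.empty

lemma pvGroups_keys (d : PySem.Dict String Int) :
    (pvGroups d).keys = PySem.Set.ofList (d.items.map Prod.snd) := by
  have h := PySem.Dict.keys_foldl_modify_key d.items Prod.snd [] (fun _ p l => l ++ [p.1]) PySem.Dict.empty
  simp only [] at h
  simpa [pvGroups, PySem.Dict.keys, PySem.Dict.empty, PySem.Set.update_nil_left] using h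

lemma pvGroups_getD (d : PySem.Dict String Int) (v : Int) :
    (pvGroups d).getD v [] = (d.items.filter (fun p => p.2 == v)).map Prod.fst := by
  have h := PySem.Dict.getD_foldl_modify_append (d.items.map (fun p => (p.2, p.1))) PySem.Dict.empty v
  rw [List.foldl_map] at h
  simp only [] at h
  simpa [pvGroups, List.filter_map, List.map_map, Function.comp] using h

-- the two branch bodies agree for any dict with distinct keys
lemma core_eq (inner : PySem.Dict String Int) (hnd : inner.keys.Nodup) :
    (match PySem.List.max? inner.keys (fun k => inner.getD k 0) with
     | none => []
     | some max_key =>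
       inner.keys.foldl (fun acc k => if inner.getD k 0 == inner.getD max_key 0 then acc ++ [k] else acc) []) =
    (match PySem.List.max? (pvGroups inner).keys (fun v => v) with
     | none => ([] : List String)
     | some m => (pvGroups inner).getD m []) := by
  have hitems := PySem.Dict.items_eq_map_keys inner hnd 0
  have hvals : inner.items.map Prod.snd = inner.keys.map (fun k => inner.getD k 0) := by
    rw [hitems, List.map_map]; rfl
  cases hA : PySem.List.max? inner.keys (fun k => inner.getD k 0) with
  | none =>
    have hk : inner.keys = [] := (PySem.List.max?_eq_none_iff _ _).mp hA
    have hg : (pvGroups inner).keys = [] := by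
      rw [pvGroups_keys, hvals, hk]; rfl
    rw [(PySem.List.max?_eq_none_iff _ _).mpr hg]
  | some mk =>
    have hmk : mk ∈ inner.keys := PySem.List.max?_mem hA
    have hmkmax := PySem.List.max?_isMax hA
    have hmem : inner.getD mk 0 ∈ (pvGroups inner).keys := by
      rw [pvGroups_keys, PySem.Set.mem_ofList, hvals]
      exact List.mem_map_of_mem hmk
    cases hB : PySem.List.max? (pvGroups inner).keys (fun v => v) with
    | none =>
      rw [(PySem.List.max?_eq_none_iff _ _).mp hB] at hmem
      exact absurd hmem (List.not_mem_nil)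
    | some m =>
      have hmmem : m ∈ (pvGroups inner).keys := PySem.List.max?_mem hB
      have hmmax := PySem.List.max?_isMax hB
      have hm : m = inner.getD mk 0 := by
        apply le_antisymm
        · rw [pvGroups_keys, PySem.Set.mem_ofList, hvals] at hmmem
          obtain ⟨k, hk, hkv⟩ := List.mem_map.mp hmmem
          rw [← hkv]; exact hmkmax k hk
        · exact hmmax _ hmem
      simp only []
      rw [PySem.List.foldl_append_if_eq_filter, List.nil_append,
          pvGroups_getD, hitems, List.filter_map, List.map_map, hm]
      simp [Function.comp_def]


-- ===== VERDICT (by name: the statement is the Claim_ definition above) =====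
theorem findMostActiveCookie_spec : Claim_equal_findMostActiveCookie := by
  intro cookie_dict date _ _
  unfold Spec_findMostActiveCookie findMostActiveCookie findMostActiveCookie_alt
  simp only []
  by_cases hc : (PySem.Dict.ofList cookie_dict).contains date = true
  · simp only [hc, if_true]
    exact core_eq _ (PySem.Dict.nodup_keys_ofList _)
  · simp [hc]
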